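-- pv_equiv track=rewrite | github.com/stkzlv/ContentEngineAI | src/scraper/amazon/media_extractor.py | _is_irrelevant_image
-- ===== SOURCE A (Python) =====
-- def _is_irrelevant_image(url: str) -> bool:
--     """Check if image URL appears to be irrelevant (sprites, icons, ads, etc.)"""
--     if not url or not isinstance(url, str):
--         return True
--
--     url_lower = url.lower()
--
--     # Skip obvious non-product images
--     irrelevant_patterns = [
--         # UI elements
--         "sprite",
--         "nav-sprite",
--         "icon",
--         "button",
--         "arrow",
--         "logo",
--         # Navigation/UI
--         "gno/sprites",
--         "navbar",
--         "header",
--         "footer",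
--         "ui-",
--         # Ads and tracking
--         "adsystem",
--         "adnxs",
--         "doubleclick",
--         "amazon-adsystem",
--         # Small/placeholder images
--         "1x1",
--         "pixel",
--         "transparent",
--         "loading",
--         "spinner",
--         # Size indicators for very small images
--         "_sx38_",
--         "_sy38_",
--         "_sx50_",
--         "_sy50_",
--         "_ac_ux",
--         "_sx75_",
--         "_sy75_",
--         # Amazon UI elements
--         "homecustomproduct/360_icon",
--         "g/01/gno",
--         "g/01/ui",
--     ]
--
--     return any(pattern in url_lower for pattern in irrelevant_patterns)
-- ===== SOURCE B (Python) =====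
-- _PATTERNS = [
--     "sprite", "nav-sprite", "icon", "button", "arrow", "logo",
--     "gno/sprites", "navbar", "header", "footer", "ui-",
--     "adsystem", "adnxs", "doubleclick", "amazon-adsystem",
--     "1x1", "pixel", "transparent", "loading", "spinner",
--     "_sx38_", "_sy38_", "_sx50_", "_sy50_", "_ac_ux", "_sx75_", "_sy75_",
--     "homecustomproduct/360_icon", "g/01/gno", "g/01/ui",
-- ]
--
-- # Patterns indexed by first character: a single left-to-right sweep over the URL
-- # tests only the bucket of patterns that could start at each position.
-- _BY_FIRST: dict = {}
-- for _p in _PATTERNS: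
--     _BY_FIRST.setdefault(_p[0], []).append(_p)
--
--
-- def _is_irrelevant_image(url: str) -> bool:
--     """Check if image URL appears to be irrelevant (sprites, icons, ads, etc.)"""
--     if not url or not isinstance(url, str):
--         return True
--
--     u = url.lower()
--     for i in range(len(u)):
--         for p in _BY_FIRST.get(u[i], ()):
--             if u.startswith(p, i):
--                 return True
--     return False
-- ===== Notes on version B (the rewrite author's own statement) =====
-- stated objective: alternative
-- what changed: Replaced the per-pattern membership scan (30 independent whole-string substring searches) by a first-character bucket index built once from the pattern list and a single left-to-right sweep that at each position tests with startswith only the bucket of patterns beginning with that character.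
import Mathlib
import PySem

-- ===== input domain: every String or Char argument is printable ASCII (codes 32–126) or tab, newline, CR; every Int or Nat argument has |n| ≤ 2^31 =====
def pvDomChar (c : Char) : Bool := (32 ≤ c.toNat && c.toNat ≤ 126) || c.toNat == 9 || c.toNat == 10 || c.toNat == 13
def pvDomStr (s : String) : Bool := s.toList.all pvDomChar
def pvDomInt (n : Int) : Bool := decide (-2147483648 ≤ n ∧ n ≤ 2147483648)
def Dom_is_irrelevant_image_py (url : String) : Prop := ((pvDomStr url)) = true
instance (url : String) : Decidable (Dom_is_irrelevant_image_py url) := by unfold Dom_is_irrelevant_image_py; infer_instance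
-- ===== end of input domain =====

-- B replaces A's 30 independent `pattern in url` scans by a first-character bucket
-- index over the same pattern list and one left-to-right sweep of the URL (objective:
-- alternative — a different matching algorithm of similar cost).


-- ===== PORT A =====
-- the literal `irrelevant_patterns` list of A
def irrelevantPatterns : List String :=
  ["sprite", "nav-sprite", "icon", "button", "arrow", "logo",
   "gno/sprites", "navbar", "header", "footer", "ui-",
   "adsystem", "adnxs", "doubleclick", "amazon-adsystem",
   "1x1", "pixel", "transparent", "loading", "spinner",
   "_sx38_", "_sy38_", "_sx50_", "_sy50_", "_ac_ux", "_sx75_", "_sy75_",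
   "homecustomproduct/360_icon", "g/01/gno", "g/01/ui"]

def is_irrelevant_image_py (url : String) : Bool :=
  if url.toList.isEmpty then true          -- `if not url …: return True` (isinstance is always true here)
  else
    let url_lower := PySem.Str.lower url
    irrelevantPatterns.any (fun pattern => PySem.Str.isIn pattern url_lower)

-- ===== PORT B =====
-- B's module-level `_PATTERNS` (same literal list)
def patternsB : List String :=
  ["sprite", "nav-sprite", "icon", "button", "arrow", "logo",
   "gno/sprites", "navbar", "header", "footer", "ui-",
   "adsystem", "adnxs", "doubleclick", "amazon-adsystem",
   "1x1", "pixel", "transparent", "loading", "spinner",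
   "_sx38_", "_sy38_", "_sx50_", "_sy50_", "_ac_ux", "_sx75_", "_sy75_",
   "homecustomproduct/360_icon", "g/01/gno", "g/01/ui"]

-- one step of B's build loop: `_BY_FIRST.setdefault(p[0], []).append(p)`
-- (the [] branch is Python's IndexError on p[0]; unreachable — every pattern is nonempty)
def setdefAppend (d : PySem.Dict Char (List String)) (p : String) : PySem.Dict Char (List String) :=
  match p.toList with
  | [] => d
  | c :: _ => PySem.Dict.insert d c (PySem.Dict.getD d c [] ++ [p])

-- B's module-level `_BY_FIRST`
def byFirst : PySem.Dict Char (List String) := patternsB.foldl setdefAppend ∅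

-- B's sweep `for i in range(len(u)): for p in _BY_FIRST.get(u[i], ()): if u.startswith(p, i)`
-- as structural recursion over the suffixes of u; `u.startswith(p, i)` is exactly
-- `startswith` of the suffix starting at i (0 ≤ i ≤ len u here).
def sweep (cs : List Char) : Bool :=
  match cs with
  | [] => false
  | c :: rest =>
      ((PySem.Dict.getD byFirst c []).any (fun p => PySem.Chars.startswith (c :: rest) p.toList))
      || sweep rest

def is_irrelevant_image_py_alt (url : String) : Bool :=
  if url.toList.isEmpty then true
  else sweep (PySem.Str.lower url).toList

-- ===== PRECONDITION & SPEC =====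
def Spec_is_irrelevant_image_py (url : String) (out : Bool) : Prop := out = is_irrelevant_image_py_alt url
instance (url : String) (out : Bool) : Decidable (Spec_is_irrelevant_image_py url out) := by unfold Spec_is_irrelevant_image_py; infer_instance

-- ===== CLAIM (what is proved, stated in full; the proofs are below) =====
def Claim_equal_is_irrelevant_image_py : Prop := ∀ (url : String), Dom_is_irrelevant_image_py url → Spec_is_irrelevant_image_py url (is_irrelevant_image_py url)

-- ===== LEMMAS AND PROOFS =====

-- the buckets of the foldl-built dict are exactly the patterns filtered by first character
theorem getD_foldl_setdefAppend (l : List String) (d : PySem.Dict Char (List String)) (c : Char) :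
    PySem.Dict.getD (l.foldl setdefAppend d) c []
      = PySem.Dict.getD d c [] ++ l.filter (fun p => p.toList.head? = some c) := by
  induction l generalizing d with
  | nil => simp
  | cons p l ih =>
    simp only [List.foldl_cons, ih, List.filter_cons]
    cases hp : p.toList with
    | nil => simp [setdefAppend, hp]
    | cons c' t =>
      simp only [setdefAppend, hp, PySem.Dict.getD_insert, List.head?_cons]
      by_cases hc : c = c'
      · simp [hc]
      · simp [hc, Ne.symm hc]

theorem mem_byFirst_iff (c : Char) (p : String) :
    p ∈ PySem.Dict.getD byFirst c [] ↔ p ∈ patternsB ∧ p.toList.head? = some c := by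
  unfold byFirst
  rw [getD_foldl_setdefAppend]
  simp [List.mem_filter, show (∅ : PySem.Dict Char (List String)).getD c [] = [] from rfl]

theorem patterns_ne_nil : ∀ p ∈ patternsB, p.toList ≠ [] := by decide

theorem bucket_any_iff (c : Char) (t : List Char) :
    ((PySem.Dict.getD byFirst c []).any (fun p => PySem.Chars.startswith (c :: t) p.toList) = true)
      ↔ ∃ p ∈ patternsB, p.toList <+: (c :: t) := by
  simp only [List.any_eq_true, PySem.Chars.startswith_iff]
  constructor
  · rintro ⟨p, hp, hpre⟩
    exact ⟨p, (mem_byFirst_iff c p).mp hp |>.1, hpre⟩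
  · rintro ⟨p, hp, hpre⟩
    refine ⟨p, (mem_byFirst_iff c p).mpr ⟨hp, ?_⟩, hpre⟩
    cases hpl : p.toList with
    | nil => exact absurd hpl (patterns_ne_nil p hp)
    | cons d r =>
      rw [hpl] at hpre
      obtain ⟨s, hs⟩ := hpre
      rw [List.cons_append, List.cons.injEq] at hs
      simp [hs.1]

theorem sweep_iff (cs : List Char) :
    sweep cs = true ↔ ∃ p ∈ patternsB, p.toList <:+: cs := by
  induction cs with
  | nil =>
    simp only [sweep, List.infix_nil]
    constructor
    · intro h; exact absurd h (by decide)
    · rintro ⟨p, hp, hnil⟩; exact absurd hnil (patterns_ne_nil p hp)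
  | cons c rest ih =>
    simp only [sweep, Bool.or_eq_true, ih, bucket_any_iff]
    constructor
    · rintro (⟨p, hp, hpre⟩ | ⟨p, hp, hinf⟩)
      · exact ⟨p, hp, List.infix_cons_iff.mpr (Or.inl hpre)⟩
      · exact ⟨p, hp, List.infix_cons_iff.mpr (Or.inr hinf)⟩
    · rintro ⟨p, hp, hinf⟩
      rcases List.infix_cons_iff.mp hinf with h | h
      · exact Or.inl ⟨p, hp, h⟩
      · exact Or.inr ⟨p, hp, h⟩

-- ===== VERDICT (by name: the statement is the Claim_ definition above) =====
theorem is_irrelevant_image_py_spec : Claim_equal_is_irrelevant_image_py := by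
  intro url _
  unfold Spec_is_irrelevant_image_py is_irrelevant_image_py is_irrelevant_image_py_alt
  by_cases h : url.toList.isEmpty
  · simp [h]
  · simp only [Bool.not_eq_true] at h
    simp only [h, Bool.false_eq_true, if_false]
    rw [Bool.eq_iff_iff, sweep_iff]
    simp only [List.any_eq_true, PySem.Str.isIn_iff_infix]
    constructor
    · rintro ⟨p, hp, hinf⟩; exact ⟨p, hp, hinf⟩
    · rintro ⟨p, hp, hinf⟩; exact ⟨p, hp, hinf⟩
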